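-- pv_equiv track=rewrite | github.com/muneebaifrah/Unstop-100-Days-Coding-Sprint | 1.Sort_the_string_as_Professor_do.py | solve
-- ===== SOURCE A (Python) =====
-- def solve(order, s):
--     freq = {}
--
--     for ch in s:
--         freq[ch] = freq.get(ch, 0) + 1
--
--     ans = []
--
--     # first add characters present in custom order
--     for ch in order:
--         if ch in freq:
--             ans.append(ch * freq[ch])
--             del freq[ch]
--
--     # remaining characters in alphabetical order
--     for ch in sorted(freq.keys()):
--         ans.append(ch * freq[ch])
--
--     return "".join(ans)
-- ===== SOURCE B (Python) =====
-- def solve(order, s):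
--     # first-occurrence rank of each order character; first wins on duplicates
--     pos = {}
--     for i, ch in enumerate(order):
--         if ch not in pos:
--             pos[ch] = i
--     n = len(order)
--     # one stable sort of the whole string by a composite numeric rank:
--     # order-chars by their rank, everything else after them alphabetically
--     return "".join(sorted(s, key=lambda ch: pos.get(ch, n) * 1114112 + ord(ch)))
-- ===== Notes on version B (the rewrite author's own statement) =====
-- stated objective: simpler
-- what changed: A builds a character counter, emits order-characters' groups while deleting them from the counter, then sorts and emits the leftover keys; B builds a first-occurrence rank dict for `order` once and does a single stable sort of the whole string by a composite numeric key (rank of order-chars, then alphabetical for the rest).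
import Mathlib
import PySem

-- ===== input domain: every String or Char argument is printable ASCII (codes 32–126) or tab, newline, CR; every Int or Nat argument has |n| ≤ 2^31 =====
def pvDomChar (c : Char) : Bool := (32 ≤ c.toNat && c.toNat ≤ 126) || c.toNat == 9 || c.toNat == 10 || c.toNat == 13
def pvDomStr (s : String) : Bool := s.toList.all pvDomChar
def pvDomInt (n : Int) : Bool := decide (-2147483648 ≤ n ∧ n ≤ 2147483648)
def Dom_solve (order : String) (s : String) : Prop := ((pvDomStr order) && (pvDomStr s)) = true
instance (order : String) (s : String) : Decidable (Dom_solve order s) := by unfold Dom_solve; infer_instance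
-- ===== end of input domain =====

-- B replaces A's counter-and-two-emission-loops strategy by one stable sort of the
-- whole string under a composite numeric rank; objective: simpler (not faster).

-- ===== PORT A =====
-- freq[ch] = freq.get(ch, 0) + 1 over s
def buildFreq (s : List Char) : PySem.Dict Char Int :=
  s.foldl (fun d ch => d.insert ch (d.getD ch 0 + 1)) PySem.Dict.empty

-- body of 'for ch in order: if ch in freq: ans.append(ch * freq[ch]); del freq[ch]'
def stepA (st : List (List Char) × PySem.Dict Char Int) (ch : Char) :
    List (List Char) × PySem.Dict Char Int :=
  if st.2.contains ch then
    (st.1 ++ [PySem.List.pyRepeat [ch] (st.2.getD ch 0)], st.2.erase ch)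
  else st

def solve (order : String) (s : String) : String :=
  let freq := buildFreq s.toList
  let st := order.toList.foldl stepA ([], freq)
  let ans := (PySem.List.sorted st.2.keys (fun k => k) false).foldl
      (fun a ch => a ++ [PySem.List.pyRepeat [ch] (st.2.getD ch 0)]) st.1
  String.ofList ans.flatten

-- ===== PORT B =====
-- body of 'for i, ch in enumerate(order): if ch not in pos: pos[ch] = i'
def stepB (d : PySem.Dict Char Int) (p : Int × Char) : PySem.Dict Char Int :=
  if d.contains p.2 then d else d.insert p.2 p.1

def solve_alt (order : String) (s : String) : String :=
  let pos := (PySem.List.enumerate order.toList).foldl stepB PySem.Dict.empty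
  let n := PySem.Str.len order
  String.ofList (PySem.List.sorted s.toList
      (fun ch => pos.getD ch n * 1114112 + (ch.toNat : Int)) false)

-- ===== PRECONDITION & SPEC =====
def Spec_solve (order : String) (s : String) (out : String) : Prop := out = solve_alt order s
instance (order : String) (s : String) (out : String) : Decidable (Spec_solve order s out) := by unfold Spec_solve; infer_instance

-- ===== CLAIM (what is proved, stated in full; the proofs are below) =====
def Claim_equal_solve : Prop := ∀ (order : String) (s : String), Dom_solve order s → Spec_solve order s (solve order s)

-- ===== LEMMAS AND PROOFS =====

-- the composite rank B sorts by, written through idxOf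
def rankK (ord : List Char) (ch : Char) : Int :=
  (if ch ∈ ord then ((ord.idxOf ch : Nat) : Int) else (ord.length : Int)) * 1114112
    + (ch.toNat : Int)

theorem char_toNat_lt (a : Char) : a.toNat < 1114112 := by
  rcases a.valid with h | ⟨_, h2⟩
  · exact Nat.lt_trans (by exact_mod_cast h) (by norm_num)
  · exact (by exact_mod_cast h2)

theorem char_lt_toNat {a b : Char} (h : a < b) : a.toNat < b.toNat :=
  Nat.lt_of_succ_le h

theorem char_eq_of_toNat_eq {a b : Char} (h : a.toNat = b.toNat) : a = b :=
  Char.ext (UInt32.toNat_inj.mp h)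

theorem rankK_inj (ord : List Char) : Function.Injective (rankK ord) := by
  intro a b h
  unfold rankK at h
  have ha := char_toNat_lt a
  have hb := char_toNat_lt b
  apply char_eq_of_toNat_eq
  by_cases h1 : a ∈ ord <;> by_cases h2 : b ∈ ord <;>
    simp only [h1, h2, if_pos, if_false] at h
  · have := List.idxOf_lt_length_of_mem h1
    have := List.idxOf_lt_length_of_mem h2
    omega
  · have := List.idxOf_lt_length_of_mem h1
    omega
  · have := List.idxOf_lt_length_of_mem h2
    omega
  · omega

theorem find?_ext {α : Type} (p q : α → Bool) (l : List α) (h : ∀ a, p a = q a) :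
    l.find? p = l.find? q := by
  have : p = q := funext h
  rw [this]

theorem dict_get?_erase_of_ne (d : PySem.Dict Char Int) (k x : Char) (h : x ≠ k) :
    (d.erase k).get? x = d.get? x := by
  simp only [PySem.Dict.erase, PySem.Dict.get?, List.find?_filter]
  congr 1
  apply find?_ext
  intro a
  by_cases ha : a.1 = x <;> simp [ha, h]

theorem dict_getD_erase_of_ne (d : PySem.Dict Char Int) (k x : Char) (v : Int) (h : x ≠ k) :
    (d.erase k).getD x v = d.getD x v := by
  simp [PySem.Dict.getD_eq_get?_getD, dict_get?_erase_of_ne d k x h]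

theorem dict_keys_erase (d : PySem.Dict Char Int) (k : Char) :
    (d.erase k).keys = d.keys.filter (fun x => !(x == k)) := by
  simp only [PySem.Dict.erase, PySem.Dict.keys, List.filter_map]
  rfl

theorem dict_contains_erase (d : PySem.Dict Char Int) (k x : Char) :
    (d.erase k).contains x = (d.contains x && !(x == k)) := by
  rw [PySem.Dict.contains_eq_decide_mem_keys, PySem.Dict.contains_eq_decide_mem_keys,
    dict_keys_erase]
  by_cases hx : x = k <;> simp [List.mem_filter, hx]

theorem dict_erase_of_not_contains (d : PySem.Dict Char Int) (k : Char)
    (h : d.contains k = false) : d.erase k = d := by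
  apply PySem.Dict.ext
  show List.filter _ d.items = d.items
  apply List.filter_eq_self.mpr
  intro a ha
  simp only [PySem.Dict.contains, List.any_eq_false] at h
  simpa using h a ha

theorem foldl_erase_getD (l : List Char) (d : PySem.Dict Char Int) (x : Char) (v : Int)
    (h : x ∉ l) : (l.foldl PySem.Dict.erase d).getD x v = d.getD x v := by
  induction l generalizing d with
  | nil => simp
  | cons y t ih =>
    simp only [List.mem_cons, not_or] at h
    simp only [List.foldl_cons, ih _ h.2, dict_getD_erase_of_ne _ _ _ _ h.1]

theorem foldl_erase_keys (l : List Char) (d : PySem.Dict Char Int) :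
    (l.foldl PySem.Dict.erase d).keys = d.keys.filter (fun x => !l.contains x) := by
  induction l generalizing d with
  | nil => simp
  | cons y t ih =>
    simp only [List.foldl_cons, ih, dict_keys_erase, List.filter_filter]
    apply List.filter_congr
    intro a _
    by_cases ha : a = y <;> simp [ha]

theorem ofList_from (l : List Char) (s : PySem.Set Char) :
    l.foldl PySem.Set.add s = s ++ (PySem.List.dedup l).filter (fun y => !s.contains y) := by
  induction l generalizing s with
  | nil => simp [PySem.List.dedup]
  | cons x t ih =>
    have hdd : PySem.List.dedup (x :: t)
        = PySem.Set.add PySem.Set.empty x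
            ++ (PySem.List.dedup t).filter
                (fun y => !(PySem.Set.add PySem.Set.empty x).contains y) := by
      rw [PySem.List.dedup_eq_ofList]
      show List.foldl PySem.Set.add (PySem.Set.add PySem.Set.empty x) t = _
      exact ih _
    have hadd : PySem.Set.add PySem.Set.empty x = [x] := by
      simp [PySem.Set.add, PySem.Set.empty, PySem.Set.contains]
    rw [List.foldl_cons, ih, hdd, hadd]
    by_cases h : s.contains x = true
    · have hm : x ∈ s := by simpa using h
      have hax : PySem.Set.add s x = s := by simp [PySem.Set.add, hm]
      rw [hax, List.filter_append, List.filter_filter]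
      have h1 : List.filter (fun y => !s.contains y) [x] = [] := by simp [hm]
      rw [h1, List.nil_append]
      congr 1
      apply List.filter_congr
      intro a _
      by_cases ha : a = x
      · subst ha; simp [hm]
      · simp [ha]
    · have hm : x ∉ s := by simpa using h
      have hax : PySem.Set.add s x = s ++ [x] := by simp [PySem.Set.add, hm]
      rw [hax, List.filter_append, List.filter_filter]
      have h1 : List.filter (fun y => !s.contains y) [x] = [x] := by simp [hm]
      rw [h1, List.append_assoc]
      congr 2
      apply List.filter_congr
      intro a _
      by_cases ha : a = x
      · subst ha; simp
      · simp [ha]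

theorem dedup_cons (x : Char) (l : List Char) :
    PySem.List.dedup (x :: l) = x :: (PySem.List.dedup l).filter (fun y => !(y == x)) := by
  rw [PySem.List.dedup_eq_ofList, PySem.Set.ofList]
  show List.foldl PySem.Set.add PySem.Set.empty (x :: l) = _
  rw [List.foldl_cons]
  have hadd : PySem.Set.add PySem.Set.empty x = [x] := by
    simp [PySem.Set.add, PySem.Set.empty, PySem.Set.contains]
  rw [hadd, ofList_from]
  simp only [List.cons_append, List.nil_append, List.cons.injEq, true_and]
  apply List.filter_congr
  intro a _
  by_cases ha : a = x <;> simp [ha]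

theorem dedup_pairwise_idxOf (l : List Char) :
    (PySem.List.dedup l).Pairwise (fun a b => l.idxOf a < l.idxOf b) := by
  induction l with
  | nil => simp [PySem.List.dedup]
  | cons x t ih =>
    rw [dedup_cons, List.pairwise_cons]
    constructor
    · intro b hb
      have hbx : b ≠ x := by
        have := List.of_mem_filter hb
        simpa using this
      rw [List.idxOf_cons_self, List.idxOf_cons_ne _ hbx.symm]
      exact Nat.succ_pos _
    · have hp := (List.Pairwise.filter (fun y => !(y == x)) ih)
      apply hp.imp_of_mem
      intro a b ha hb hab
      have hax : a ≠ x := by simpa using List.of_mem_filter ha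
      have hbx : b ≠ x := by simpa using List.of_mem_filter hb
      rw [List.idxOf_cons_ne _ hax.symm, List.idxOf_cons_ne _ hbx.symm]
      exact Nat.succ_lt_succ hab

theorem loopA (l : List Char) (d : PySem.Dict Char Int) (acc : List (List Char)) :
    l.foldl stepA (acc, d)
      = (acc ++ ((PySem.List.dedup l).filter (fun ch => d.contains ch)).map
            (fun ch => PySem.List.pyRepeat [ch] (d.getD ch 0)),
         l.foldl PySem.Dict.erase d) := by
  induction l generalizing d acc with
  | nil => simp [PySem.List.dedup]
  | cons x t ih =>
    rw [List.foldl_cons, List.foldl_cons, dedup_cons]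
    by_cases h : d.contains x = true
    · have hstep : stepA (acc, d) x
          = (acc ++ [PySem.List.pyRepeat [x] (d.getD x 0)], d.erase x) := by
        simp [stepA, h]
      rw [hstep, ih]
      simp only [List.filter_cons, h, if_pos, List.map_cons, Prod.mk.injEq, and_true]
      rw [List.filter_filter, List.append_assoc]
      simp only [List.cons_append]
      congr 1
      have hfil : List.filter (fun ch => (d.erase x).contains ch) (PySem.List.dedup t)
          = List.filter (fun a => d.contains a && !(a == x)) (PySem.List.dedup t) := by
        apply List.filter_congr
        intro a _
        rw [dict_contains_erase]
      rw [hfil]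
      have hfil2 : List.filter (fun a => d.contains a && !(a == x)) (PySem.List.dedup t)
          = List.filter (fun a => !(a == x) && d.contains a) (PySem.List.dedup t) := by
        apply List.filter_congr
        intro a _
        exact Bool.and_comm _ _
      rw [hfil2, List.nil_append]
      congr 1
      apply List.map_congr_left
      intro a ha
      have hax : a ≠ x := by
        have := List.of_mem_filter ha
        simp only [Bool.and_eq_true, Bool.not_eq_eq_eq_not, Bool.not_true,
          beq_eq_false_iff_ne, ne_eq] at this
        exact this.1
      rw [dict_getD_erase_of_ne _ _ _ _ hax]
    · have hstep : stepA (acc, d) x = (acc, d) := by simp [stepA, h]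
      have herase : d.erase x = d :=
        dict_erase_of_not_contains d x (by simpa using h)
      rw [hstep, ih, herase]
      simp only [List.filter_cons]
      rw [if_neg (by simp [h])]
      rw [List.filter_filter]
      congr 3
      apply List.filter_congr
      intro a _
      by_cases ha : a = x <;> simp [ha, h]

theorem posFold_get? (l : List Char) (i : Int) (d : PySem.Dict Char Int) (ch : Char) :
    ((PySem.List.enumerate l i).foldl stepB d).get? ch
      = if ch ∈ l ∧ d.contains ch = false then some (i + (l.idxOf ch : Int))
        else d.get? ch := by
  induction l generalizing i d with
  | nil => simp
  | cons x t ih =>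
    rw [PySem.List.enumerate_cons, List.foldl_cons]
    by_cases hc : d.contains x = true
    · have hstep : stepB d (i, x) = d := by simp [stepB, hc]
      rw [hstep, ih]
      by_cases hx : ch = x
      · subst hx
        simp [hc]
      · simp only [List.mem_cons, hx, false_or]
        by_cases hm : ch ∈ t ∧ d.contains ch = false
        · rw [if_pos hm, if_pos ⟨hm.1, hm.2⟩, List.idxOf_cons_ne _ (Ne.symm hx)]
          push_cast
          ring_nf
        · rw [if_neg hm, if_neg (by tauto)]
    · have hstep : stepB d (i, x) = d.insert x i := by simp [stepB, hc]
      rw [hstep, ih]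
      by_cases hx : ch = x
      · subst hx
        rw [if_neg (by simp)]
        rw [PySem.Dict.get?_insert_self]
        simp [hc]
      · have hci : (d.insert x i).contains ch = d.contains ch := by
          simp [PySem.Dict.contains_insert, hx]
        have hgi : (d.insert x i).get? ch = d.get? ch :=
          PySem.Dict.get?_insert_of_ne _ _ hx
        rw [hci, hgi]
        simp only [List.mem_cons, hx, false_or]
        by_cases hm : ch ∈ t ∧ d.contains ch = false
        · rw [if_pos hm, if_pos ⟨hm.1, hm.2⟩, List.idxOf_cons_ne _ (Ne.symm hx)]
          push_cast
          ring_nf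
        · rw [if_neg hm, if_neg (by tauto)]

theorem count_flatten_groups (L : List Char) (f : Char → Nat) (hnd : L.Nodup) (a : Char) :
    ((L.map (fun ch => List.replicate (f ch) ch)).flatten).count a
      = if a ∈ L then f a else 0 := by
  induction L with
  | nil => simp
  | cons x t ih =>
    simp only [List.map_cons, List.flatten_cons, List.count_append, List.nodup_cons] at *
    rw [ih hnd.2, List.count_replicate]
    by_cases hx : a = x
    · subst hx
      simp [hnd.1]
    · simp [hx, Ne.symm hx]

theorem pairwise_flatten_groups (K : Char → Int) (L : List Char) (f : Char → Nat)
    (hL : L.Pairwise (fun a b => K a < K b)) :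
    ((L.map (fun ch => List.replicate (f ch) ch)).flatten).Pairwise
      (fun a b => K a ≤ K b) := by
  induction L with
  | nil => simp
  | cons x t ih =>
    rw [List.pairwise_cons] at hL
    simp only [List.map_cons, List.flatten_cons]
    rw [List.pairwise_append]
    refine ⟨?_, ih hL.2, ?_⟩
    · rw [List.pairwise_replicate]
      exact Or.inr le_rfl
    · intro a ha b hb
      have hax : a = x := List.eq_of_mem_replicate ha
      rcases List.mem_flatten.mp hb with ⟨g, hg, hbg⟩
      rcases List.mem_map.mp hg with ⟨y, hy, rfl⟩
      have hby : b = y := List.eq_of_mem_replicate hbg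
      subst hax hby
      exact le_of_lt (hL.1 _ hy)

-- ===== VERDICT (by name: the statement is the Claim_ definition above) =====
theorem solve_spec : Claim_equal_solve := by
  unfold Claim_equal_solve Spec_solve
  intro order s _
  show solve order s = solve_alt order s
  unfold solve solve_alt buildFreq
  simp only []
  rw [PySem.Dict.foldl_insert_getD_add_one_eq_counter, loopA]
  simp only []
  rw [PySem.List.foldl_append_singleton_eq_map, List.nil_append]
  -- rewrite both emission maps into replicate-groups over s-counts
  have hD1map :
      List.map (fun ch => PySem.List.pyRepeat [ch] ((PySem.Dict.counter s.toList).getD ch 0))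
          (List.filter (fun ch => (PySem.Dict.counter s.toList).contains ch)
            (PySem.List.dedup order.toList))
        = List.map (fun ch => List.replicate (s.toList.count ch) ch)
            (List.filter (fun ch => (PySem.Dict.counter s.toList).contains ch)
              (PySem.List.dedup order.toList)) := by
    apply List.map_congr_left
    intro a _
    rw [PySem.Dict.getD_counter, PySem.List.pyRepeat_singleton]
    simp
  have hremmap :
      List.map (fun ch => PySem.List.pyRepeat [ch]
            ((List.foldl PySem.Dict.erase (PySem.Dict.counter s.toList) order.toList).getD ch 0))
          (PySem.List.sorted
            (List.foldl PySem.Dict.erase (PySem.Dict.counter s.toList) order.toList).keys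
            (fun k => k))
        = List.map (fun ch => List.replicate (s.toList.count ch) ch)
            (PySem.List.sorted
              (List.foldl PySem.Dict.erase (PySem.Dict.counter s.toList) order.toList).keys
              (fun k => k)) := by
    apply List.map_congr_left
    intro a ha
    have hmem := (PySem.List.mem_sorted _ _ _ _).mp ha
    rw [foldl_erase_keys] at hmem
    have hnotord : a ∉ order.toList := by
      have := List.of_mem_filter hmem
      simpa using this
    rw [foldl_erase_getD _ _ _ _ hnotord, PySem.Dict.getD_counter,
      PySem.List.pyRepeat_singleton]
    simp
  rw [hD1map, hremmap, ← List.map_append]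
  have hkey :
      (fun ch => (List.foldl stepB PySem.Dict.empty
            (PySem.List.enumerate order.toList)).getD ch (PySem.Str.len order) * 1114112
          + (ch.toNat : Int))
        = rankK order.toList := by
    funext ch
    rw [PySem.Dict.getD_eq_get?_getD, posFold_get? order.toList 0 PySem.Dict.empty ch]
    by_cases hm : ch ∈ order.toList
    · rw [if_pos ⟨hm, PySem.Dict.contains_empty ch⟩]
      simp [rankK, hm]
    · rw [if_neg (by tauto)]
      simp [rankK, hm, PySem.Str.len]
  rw [hkey]
  apply congrArg String.ofList
  -- names for the two segments
  have hD1mem : ∀ a : Char,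
      a ∈ List.filter (fun ch => (PySem.Dict.counter s.toList).contains ch)
            (PySem.List.dedup order.toList)
        ↔ a ∈ order.toList ∧ a ∈ s.toList := by
    intro a
    rw [List.mem_filter, PySem.Dict.contains_counter]
    simp
  have hremmem : ∀ a : Char,
      a ∈ PySem.List.sorted
            (List.foldl PySem.Dict.erase (PySem.Dict.counter s.toList) order.toList).keys
            (fun k => k) false
        ↔ a ∈ s.toList ∧ a ∉ order.toList := by
    intro a
    rw [PySem.List.mem_sorted, foldl_erase_keys, List.mem_filter, PySem.Dict.keys_counter]
    simp [PySem.Set.mem_ofList]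
  have hndD1 : (List.filter (fun ch => (PySem.Dict.counter s.toList).contains ch)
      (PySem.List.dedup order.toList)).Nodup :=
    (PySem.List.nodup_dedup order.toList).filter _
  have hndrem : (PySem.List.sorted
      (List.foldl PySem.Dict.erase (PySem.Dict.counter s.toList) order.toList).keys
      (fun k => k) false).Nodup := by
    apply (PySem.List.sorted_perm _ _ _).nodup_iff.mpr
    rw [foldl_erase_keys, PySem.Dict.keys_counter]
    exact (PySem.Set.nodup_ofList s.toList).filter _
  have hnd : (List.filter (fun ch => (PySem.Dict.counter s.toList).contains ch)
        (PySem.List.dedup order.toList)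
      ++ PySem.List.sorted
          (List.foldl PySem.Dict.erase (PySem.Dict.counter s.toList) order.toList).keys
          (fun k => k) false).Nodup := by
    rw [List.nodup_append]
    refine ⟨hndD1, hndrem, ?_⟩
    intro a ha b hb
    have h1 := ((hD1mem a).mp ha).1
    have h2 := ((hremmem b).mp hb).2
    intro hab
    exact h2 (hab ▸ h1)
  have hpair : (List.filter (fun ch => (PySem.Dict.counter s.toList).contains ch)
        (PySem.List.dedup order.toList)
      ++ PySem.List.sorted
          (List.foldl PySem.Dict.erase (PySem.Dict.counter s.toList) order.toList).keys
          (fun k => k) false).Pairwise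
      (fun a b => rankK order.toList a < rankK order.toList b) := by
    rw [List.pairwise_append]
    refine ⟨?_, ?_, ?_⟩
    · have hp := (dedup_pairwise_idxOf order.toList).filter
        (fun ch => (PySem.Dict.counter s.toList).contains ch)
      apply hp.imp_of_mem
      intro a b ha hb hab
      have hma := ((hD1mem a).mp ha).1
      have hmb := ((hD1mem b).mp hb).1
      have hta := char_toNat_lt a
      unfold rankK
      rw [if_pos hma, if_pos hmb]
      omega
    · have hsp := PySem.List.sorted_pairwise
        (List.foldl PySem.Dict.erase (PySem.Dict.counter s.toList) order.toList).keys
        (fun k => k)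
      have hne : (PySem.List.sorted
          (List.foldl PySem.Dict.erase (PySem.Dict.counter s.toList) order.toList).keys
          (fun k => k) false).Pairwise (fun a b => a ≠ b) := hndrem
      apply (hsp.and hne).imp_of_mem
      intro a b ha hb hab
      have hma := ((hremmem a).mp ha).2
      have hmb := ((hremmem b).mp hb).2
      have hlt : a < b := lt_of_le_of_ne hab.1 hab.2
      have htn := char_lt_toNat hlt
      unfold rankK
      rw [if_neg hma, if_neg hmb]
      omega
    · intro a ha b hb
      have hma := ((hD1mem a).mp ha).1
      have hmb := ((hremmem b).mp hb).2
      have hidx := List.idxOf_lt_length_of_mem hma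
      have hta := char_toNat_lt a
      unfold rankK
      rw [if_pos hma, if_neg hmb]
      omega
  have hperm : ((List.map (fun ch => List.replicate (List.count ch s.toList) ch)
        (List.filter (fun ch => (PySem.Dict.counter s.toList).contains ch)
            (PySem.List.dedup order.toList)
          ++ PySem.List.sorted
              (List.foldl PySem.Dict.erase (PySem.Dict.counter s.toList) order.toList).keys
              (fun k => k) false)).flatten).Perm s.toList := by
    rw [List.perm_iff_count]
    intro a
    rw [count_flatten_groups _ _ hnd a]
    by_cases hmem : a ∈ List.filter (fun ch => (PySem.Dict.counter s.toList).contains ch)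
          (PySem.List.dedup order.toList)
        ++ PySem.List.sorted
            (List.foldl PySem.Dict.erase (PySem.Dict.counter s.toList) order.toList).keys
            (fun k => k) false
    · rw [if_pos hmem]
    · rw [if_neg hmem]
      symm
      rw [List.count_eq_zero]
      intro hc
      apply hmem
      rw [List.mem_append]
      by_cases ho : a ∈ order.toList
      · exact Or.inl ((hD1mem a).mpr ⟨ho, hc⟩)
      · exact Or.inr ((hremmem a).mpr ⟨hc, ho⟩)
  exact PySem.List.eq_of_perm_of_pairwise_le_of_injective (rankK order.toList)
    (rankK_inj order.toList)
    (hperm.trans (PySem.List.sorted_perm s.toList (rankK order.toList) false).symm)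
    (pairwise_flatten_groups _ _ _ hpair)
    (PySem.List.sorted_pairwise s.toList (rankK order.toList))
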